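-- pv_equiv track=rewrite | github.com/pq1121/algorithm | hw_2/task.py | reverse_even_elements
-- ===== SOURCE A (Python) =====
-- def  reverse_even_elements(arr: list[int]):
--
--     if not isinstance(arr, list): raise TypeError()
--
--     n = len(arr)
--     index_temp_arr = []
--     temp_arr = []
--
--     for i in range(n):
--
--         if arr[i] % 2 == 0:
--             index_temp_arr.append(i)
--             temp_arr.append(arr[i])
--     temp_arr.reverse()
--
--     for i in range(len(index_temp_arr)):
--         arr[index_temp_arr[i]] = temp_arr[i]
--
--     return arr
-- ===== SOURCE B (Python) =====
-- def reverse_even_elements(arr: list[int]):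
--     if not isinstance(arr, list): raise TypeError()
--     left, right = 0, len(arr) - 1
--     while left < right:
--         if arr[left] % 2:
--             left += 1
--         elif arr[right] % 2:
--             right -= 1
--         else:
--             arr[left], arr[right] = arr[right], arr[left]
--             left += 1
--             right -= 1
--     return arr
-- ===== Notes on version B (the rewrite author's own statement) =====
-- stated objective: alternative
-- what changed: Replaces A's two auxiliary lists (even indices + even values, reversed then written back by index) with an in-place two-pointer swap loop that uses O(1) extra space.
import Mathlib
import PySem

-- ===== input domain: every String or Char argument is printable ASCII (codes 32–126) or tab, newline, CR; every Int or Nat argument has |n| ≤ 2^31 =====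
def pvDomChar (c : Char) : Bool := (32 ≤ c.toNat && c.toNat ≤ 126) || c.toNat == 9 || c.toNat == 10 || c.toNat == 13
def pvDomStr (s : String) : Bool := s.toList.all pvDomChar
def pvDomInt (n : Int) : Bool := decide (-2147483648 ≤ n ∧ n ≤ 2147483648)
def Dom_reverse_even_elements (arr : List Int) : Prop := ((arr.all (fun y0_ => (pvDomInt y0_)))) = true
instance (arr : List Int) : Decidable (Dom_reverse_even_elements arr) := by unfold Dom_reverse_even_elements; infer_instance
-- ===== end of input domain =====

-- B reverses the even-valued elements with an in-place two-pointer swap loop instead of A's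
-- auxiliary index/value lists; both Pythons mutate `arr` in place and return it — the theorem
-- is about the returned value. Python's `% 2` on ints agrees with Lean's `Int.emod` (divisor 2 > 0).

-- ===== PORT A =====
def reverse_even_elements (arr : List Int) : List Int :=
  let n := arr.length
  -- first loop: collect indices and values of the even elements
  let p := (List.range n).foldl
    (fun (p : List Nat × List Int) i =>
      if arr.getD i 0 % 2 = 0 then (p.1 ++ [i], p.2 ++ [arr.getD i 0]) else p)
    ([], [])
  let temp_arr := p.2.reverse
  -- second loop: write the reversed even values back at the recorded indices
  (List.range p.1.length).foldl (fun a i => a.set (p.1.getD i 0) (temp_arr.getD i 0)) arr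

-- ===== PORT B =====
-- the while-loop of Source B: left/right pointers, swap when both ends are even
def altGo (arr : List Int) (l r : Nat) : List Int :=
  if _h : l < r then
    if arr.getD l 0 % 2 ≠ 0 then altGo arr (l + 1) r
    else if arr.getD r 0 % 2 ≠ 0 then altGo arr l (r - 1)
    else altGo ((arr.set l (arr.getD r 0)).set r (arr.getD l 0)) (l + 1) (r - 1)
  else arr
termination_by r - l
decreasing_by all_goals omega

def reverse_even_elements_alt (arr : List Int) : List Int :=
  altGo arr 0 (arr.length - 1)

-- ===== PRECONDITION & SPEC =====
def Spec_reverse_even_elements (arr : List Int) (out : List Int) : Prop := out = reverse_even_elements_alt arr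
instance (arr : List Int) (out : List Int) : Decidable (Spec_reverse_even_elements arr out) := by unfold Spec_reverse_even_elements; infer_instance

-- ===== CLAIM (what is proved, stated in full; the proofs are below) =====
def Claim_equal_reverse_even_elements : Prop := ∀ (arr : List Int), Dom_reverse_even_elements arr → Spec_reverse_even_elements arr (reverse_even_elements arr)

-- ===== LEMMAS AND PROOFS =====

-- the even-valued elements, in order
def evens (xs : List Int) : List Int := xs.filter (fun x => x % 2 = 0)

-- replace the even elements of xs by the elements of es, in order (keep xs's element if es runs out)
def fill : List Int → List Int → List Int
  | [], _ => []
  | x :: xs, es =>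
    if x % 2 = 0 then
      match es with
      | [] => x :: fill xs []
      | e :: es' => e :: fill xs es'
    else x :: fill xs es

def countEvens (xs : List Int) : Nat := xs.countP (fun x => x % 2 = 0)

theorem length_evens (xs : List Int) : (evens xs).length = countEvens xs := by
  simp [evens, countEvens, List.countP_eq_length_filter]

theorem evens_append (s t : List Int) : evens (s ++ t) = evens s ++ evens t := by
  simp [evens]

theorem countEvens_cons (x : Int) (xs : List Int) :
    countEvens (x :: xs) = (if x % 2 = 0 then 1 else 0) + countEvens xs := by
  have hd : (2 ∣ x) ↔ x % 2 = 0 := Int.dvd_iff_emod_eq_zero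
  by_cases hx : x % 2 = 0 <;> simp [countEvens, hd, hx, Nat.add_comm]

theorem fill_append (s t es : List Int) :
    fill (s ++ t) es = fill s es ++ fill t (es.drop (countEvens s)) := by
  induction s generalizing es with
  | nil => simp [fill, countEvens]
  | cons x xs ih =>
    rw [List.cons_append]
    by_cases hx : x % 2 = 0
    · cases es with
      | nil => simp only [fill, if_pos hx, ih, List.drop_nil, List.cons_append]
      | cons e es' =>
        simp only [fill, if_pos hx, ih, countEvens_cons, hx, if_true, List.cons_append]
        rw [Nat.add_comm 1, List.drop_succ_cons]
    · simp only [fill, if_neg hx, ih, countEvens_cons, hx, if_false, List.cons_append,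
        Nat.zero_add]

theorem fill_prefix (s es es2 : List Int) (h : countEvens s ≤ es.length) :
    fill s (es ++ es2) = fill s es := by
  induction s generalizing es with
  | nil => simp [fill]
  | cons x xs ih =>
    by_cases hx : x % 2 = 0
    · cases es with
      | nil =>
        exfalso
        rw [countEvens_cons, if_pos hx] at h
        simp at h
      | cons e es' =>
        rw [countEvens_cons, if_pos hx] at h
        simp only [List.length_cons] at h
        simp only [fill, if_pos hx, List.cons_append]
        rw [ih _ (by omega)]
    · rw [countEvens_cons, if_neg hx, Nat.zero_add] at h
      simp only [fill, if_neg hx]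
      rw [ih _ h]

theorem evens_cons (x : Int) (s : List Int) :
    evens (x :: s) = if x % 2 = 0 then x :: evens s else evens s := by
  have hd : (2 ∣ x) ↔ x % 2 = 0 := Int.dvd_iff_emod_eq_zero
  by_cases hx : x % 2 = 0 <;> simp [evens, hd, hx]

theorem fill_single (y : Int) (es : List Int) (hy : ¬ y % 2 = 0) : fill [y] es = [y] := by
  simp [fill, hy]

theorem T_odd_head (x : Int) (s : List Int) (hx : ¬ x % 2 = 0) :
    fill (x :: s) (evens (x :: s)).reverse = x :: fill s (evens s).reverse := by
  rw [evens_cons, if_neg hx]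
  simp [fill, hx]

theorem T_odd_last (s : List Int) (y : Int) (hy : ¬ y % 2 = 0) :
    fill (s ++ [y]) (evens (s ++ [y])).reverse = fill s (evens s).reverse ++ [y] := by
  have he : evens (s ++ [y]) = evens s := by
    rw [evens_append, evens_cons, if_neg hy]; simp [evens]
  rw [he, fill_append, fill_single _ _ hy]

theorem rev_len (s : List Int) : (evens s).reverse.length = countEvens s := by
  rw [List.length_reverse, length_evens]

theorem T_even_both (x : Int) (s : List Int) (y : Int)
    (hx : x % 2 = 0) (hy : y % 2 = 0) :
    fill (x :: (s ++ [y])) (evens (x :: (s ++ [y]))).reverse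
      = y :: (fill s (evens s).reverse ++ [x]) := by
  have he : evens (x :: (s ++ [y])) = x :: (evens s ++ [y]) := by
    rw [evens_cons, if_pos hx, evens_append, evens_cons, if_pos hy]; simp [evens]
  rw [he]
  have hrev : (x :: (evens s ++ [y])).reverse = y :: ((evens s).reverse ++ [x]) := by
    simp
  rw [hrev]
  show fill (x :: (s ++ [y])) (y :: ((evens s).reverse ++ [x])) = _
  rw [fill, if_pos hx, fill_append]
  have hdrop : ((evens s).reverse ++ [x]).drop (countEvens s) = [x] := by
    rw [← rev_len s, List.drop_left]
  rw [hdrop]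
  have hfy : fill [y] [x] = [x] := by simp [fill, hy]
  rw [hfy, fill_prefix s (evens s).reverse [x] (by rw [← rev_len s])]

theorem fill_single_self (x : Int) : fill [x] (evens [x]).reverse = [x] := by
  by_cases hx : x % 2 = 0
  · rw [evens_cons, if_pos hx]; simp [evens, fill, hx]
  · rw [evens_cons, if_neg hx]; simp [evens, fill, hx]

theorem altGo_seg (k : Nat) : ∀ (seg pre post : List Int), seg.length = k →
    altGo (pre ++ seg ++ post) pre.length (pre.length + seg.length - 1)
      = pre ++ fill seg (evens seg).reverse ++ post := by
  induction k using Nat.strong_induction_on with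
  | _ k IH =>
  intro seg pre post hlen
  match seg with
  | [] =>
    rw [altGo, dif_neg (by simp)]
    simp [fill]
  | [x] =>
    rw [altGo, dif_neg (by simp)]
    rw [fill_single_self]
  | x :: b :: rest =>
    rcases List.eq_nil_or_concat' (b :: rest) with h2 | ⟨mid, y, h2⟩
    · exact absurd h2 (by simp)
    · -- seg = x :: mid ++ [y]
      have hk : mid.length + 2 = k := by
        have h2l := congrArg List.length h2
        simp at h2l hlen
        omega
      rw [h2]
      have harr : pre ++ (x :: (mid ++ [y])) ++ post
          = pre ++ x :: (mid ++ [y] ++ post) := by simp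
      have hLR : pre.length + (x :: (mid ++ [y])).length - 1 = pre.length + mid.length + 1 := by
        simp <;> omega
      have hgl : (pre ++ (x :: (mid ++ [y])) ++ post).getD pre.length 0 = x := by
        rw [harr, List.getD_append_right pre _ 0 pre.length (le_refl _)]
        simp
      have hgr : (pre ++ (x :: (mid ++ [y])) ++ post).getD (pre.length + mid.length + 1) 0 = y := by
        have ha : pre ++ (x :: (mid ++ [y])) ++ post
            = (pre ++ x :: mid) ++ ([y] ++ post) := by simp
        rw [ha, List.getD_append_right _ _ 0 _ (by simp <;> omega)]
        have h0 : pre.length + mid.length + 1 - (pre ++ x :: mid).length = 0 := by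
          simp <;> omega
        rw [h0]
        simp
      rw [hLR, altGo, dif_pos (by omega)]
      by_cases hx : x % 2 = 0
      · by_cases hy : y % 2 = 0
        · -- both even: swap and recurse on mid
          rw [if_neg (by rw [hgl]; simp [hx]), if_neg (by rw [hgr]; simp [hy])]
          have hset : ((pre ++ (x :: (mid ++ [y])) ++ post).set pre.length
                ((pre ++ (x :: (mid ++ [y])) ++ post).getD (pre.length + mid.length + 1) 0)).set
                (pre.length + mid.length + 1) ((pre ++ (x :: (mid ++ [y])) ++ post).getD pre.length 0)
              = (pre ++ [y]) ++ mid ++ ([x] ++ post) := by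
            rw [hgl, hgr, harr]
            rw [List.set_append_right _ _ (le_refl pre.length)]
            simp only [Nat.sub_self, List.set_cons_zero]
            have ha : pre ++ y :: (mid ++ [y] ++ post)
                = (pre ++ y :: mid) ++ ([y] ++ post) := by simp
            rw [ha, List.set_append_right _ _ (by simp <;> omega)]
            have h0 : pre.length + mid.length + 1 - (pre ++ y :: mid).length = 0 := by
              simp <;> omega
            rw [h0]
            simp
          rw [hset]
          have hpre : pre.length + 1 = (pre ++ [y]).length := by simp
          have hr : pre.length + mid.length + 1 - 1 = (pre ++ [y]).length + mid.length - 1 := by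
            simp <;> omega
          rw [hpre, hr, IH mid.length (by omega) mid (pre ++ [y]) ([x] ++ post) rfl]
          rw [T_even_both x mid y hx hy]
          simp
        · -- y odd: move right pointer
          rw [if_neg (by rw [hgl]; simp [hx]), if_pos (by rw [hgr]; simpa using hy)]
          have hr : pre.length + mid.length + 1 - 1 = pre.length + (x :: mid).length - 1 := by simp
          have harr2 : pre ++ (x :: (mid ++ [y])) ++ post
              = pre ++ (x :: mid) ++ ([y] ++ post) := by simp
          rw [hr, harr2, IH (x :: mid).length (by simp <;> omega) (x :: mid) pre ([y] ++ post) rfl]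
          have ha : x :: (mid ++ [y]) = (x :: mid) ++ [y] := by simp
          rw [ha, T_odd_last (x :: mid) y hy]
          simp
      · -- x odd: move left pointer
        rw [if_pos (by rw [hgl]; simpa using hx)]
        have hr : pre.length + mid.length + 1 = (pre ++ [x]).length + (mid ++ [y]).length - 1 := by
          simp <;> omega
        have harr2 : pre ++ (x :: (mid ++ [y])) ++ post
            = (pre ++ [x]) ++ (mid ++ [y]) ++ post := by simp
        have hpre : pre.length + 1 = (pre ++ [x]).length := by simp
        rw [hpre, hr, harr2, IH (mid ++ [y]).length (by simp <;> omega) (mid ++ [y]) (pre ++ [x]) post rfl]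
        rw [T_odd_head x (mid ++ [y]) hx]
        simp

theorem B_eq_fill (arr : List Int) :
    reverse_even_elements_alt arr = fill arr (evens arr).reverse := by
  have h := altGo_seg arr.length arr [] [] rfl
  simpa [reverse_even_elements_alt] using h

-- A side
def evenIdxs (xs : List Int) : List Nat :=
  (List.range xs.length).filter (fun i => xs.getD i 0 % 2 = 0)

theorem foldl_collect (arr : List Int) (l : List Nat) (a : List Nat) (b : List Int) :
    l.foldl
      (fun (p : List Nat × List Int) i =>
        if arr.getD i 0 % 2 = 0 then (p.1 ++ [i], p.2 ++ [arr.getD i 0]) else p)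
      (a, b)
    = (a ++ l.filter (fun i => arr.getD i 0 % 2 = 0),
       b ++ (l.filter (fun i => arr.getD i 0 % 2 = 0)).map (fun i => arr.getD i 0)) := by
  induction l generalizing a b with
  | nil => simp
  | cons i l ih =>
    rw [List.foldl_cons]
    by_cases h : arr.getD i 0 % 2 = 0
    · have hdv : 2 ∣ arr[i]?.getD 0 := Int.dvd_of_emod_eq_zero (by simpa [List.getD] using h)
      rw [if_pos h, ih, List.filter_cons, if_pos (by simp [hdv])]
      simp
    · have hdv : ¬ 2 ∣ arr[i]?.getD 0 :=
        fun hc => h (by simpa [List.getD] using Int.emod_eq_zero_of_dvd hc)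
      rw [if_neg h, ih, List.filter_cons, if_neg (by simp [hdv])]

theorem A_fold1 (arr : List Int) :
    ((List.range arr.length).foldl
      (fun (p : List Nat × List Int) i =>
        if arr.getD i 0 % 2 = 0 then (p.1 ++ [i], p.2 ++ [arr.getD i 0]) else p)
      ([], []))
      = (evenIdxs arr, (evenIdxs arr).map (fun i => arr.getD i 0)) := by
  rw [foldl_collect]
  simp [evenIdxs]

theorem evenIdxs_cons (x : Int) (t : List Int) :
    evenIdxs (x :: t) = (if x % 2 = 0 then [0] else []) ++ (evenIdxs t).map (· + 1) := by
  have hd : (2 ∣ x) ↔ x % 2 = 0 := Int.dvd_iff_emod_eq_zero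
  unfold evenIdxs
  rw [List.length_cons, List.range_succ_eq_map, List.filter_cons]
  by_cases hx : x % 2 = 0 <;>
    · simp [hd, hx, List.filter_map, Function.comp_def]
      rfl

theorem idx_map_getD (xs : List Int) :
    (evenIdxs xs).map (fun i => xs.getD i 0) = evens xs := by
  induction xs with
  | nil => simp [evenIdxs, evens]
  | cons x t ih =>
    rw [evenIdxs_cons, evens_cons]
    by_cases hx : x % 2 = 0 <;>
      simp [hx, List.map_map, Function.comp_def, ← ih]

theorem foldl_range_set (is : List Nat) (ts : List Int) (a : List Int)
    (h : is.length ≤ ts.length) :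
    (List.range is.length).foldl (fun a i => a.set (is.getD i 0) (ts.getD i 0)) a
      = (is.zip ts).foldl (fun a p => a.set p.1 p.2) a := by
  induction is generalizing ts a with
  | nil => simp
  | cons i is' ih =>
    cases ts with
    | nil => simp at h
    | cons t ts' =>
      rw [List.length_cons, List.range_succ_eq_map]
      simp only [List.foldl_cons, List.foldl_map, List.getD_cons_succ, List.getD_cons_zero,
        List.zip_cons_cons]
      exact ih ts' _ (by simpa using h)

theorem setMany_shift (ps : List (Nat × Int)) (z : Int) (t : List Int) :
    (ps.map (fun p => (p.1 + 1, p.2))).foldl (fun a p => a.set p.1 p.2) (z :: t)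
      = z :: ps.foldl (fun a p => a.set p.1 p.2) t := by
  induction ps generalizing t with
  | nil => simp
  | cons p ps ih => simp [List.set_cons_succ, ih]

theorem setMany_fill (arr : List Int) : ∀ (vs : List Int), vs.length = countEvens arr →
    ((evenIdxs arr).zip vs).foldl (fun a p => a.set p.1 p.2) arr = fill arr vs := by
  induction arr with
  | nil => intro vs _; simp [evenIdxs, fill]
  | cons x t ih =>
    intro vs hv
    rw [evenIdxs_cons]
    by_cases hx : x % 2 = 0
    · rw [countEvens_cons, if_pos hx] at hv
      cases vs with
      | nil => simp at hv; omega
      | cons v vs' =>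
        rw [if_pos hx]
        simp only [List.singleton_append, List.zip_cons_cons, List.foldl_cons,
          List.set_cons_zero, List.zip_map_left]
        have : (List.map (Prod.map (· + 1) id) ((evenIdxs t).zip vs'))
            = ((evenIdxs t).zip vs').map (fun p => (p.1 + 1, p.2)) := by
          simp [Prod.map]
        rw [this, setMany_shift, ih vs' (by simp at hv; omega)]
        simp [fill, hx]
    · rw [countEvens_cons, if_neg hx, Nat.zero_add] at hv
      rw [if_neg hx]
      simp only [List.nil_append, List.zip_map_left]
      have : (List.map (Prod.map (· + 1) id) ((evenIdxs t).zip vs))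
          = ((evenIdxs t).zip vs).map (fun p => (p.1 + 1, p.2)) := by
        simp [Prod.map]
      rw [this, setMany_shift, ih vs hv]
      simp [fill, hx]

theorem A_eq_fill (arr : List Int) :
    reverse_even_elements arr = fill arr (evens arr).reverse := by
  show (fun arr =>
      let n := arr.length
      let p := (List.range n).foldl
        (fun (p : List Nat × List Int) i =>
          if arr.getD i 0 % 2 = 0 then (p.1 ++ [i], p.2 ++ [arr.getD i 0]) else p)
        ([], [])
      let temp_arr := p.2.reverse
      (List.range p.1.length).foldl (fun a i => a.set (p.1.getD i 0) (temp_arr.getD i 0)) arr) arr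
    = fill arr (evens arr).reverse
  simp only
  rw [A_fold1]
  simp only [idx_map_getD]
  have hlen : (evenIdxs arr).length ≤ (evens arr).reverse.length := by
    rw [← idx_map_getD arr]
    simp
  rw [foldl_range_set _ _ _ hlen]
  exact setMany_fill arr (evens arr).reverse (rev_len arr)

-- ===== VERDICT (by name: the statement is the Claim_ definition above) =====
theorem reverse_even_elements_spec : Claim_equal_reverse_even_elements := by
  intro arr _
  unfold Spec_reverse_even_elements
  rw [A_eq_fill, B_eq_fill]
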